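-- pv_equiv track=rewrite | github.com/Zelaron/Sprecher-Network | benchmarks/pinn_sn_vs_kan_poisson.py | approximate_kan_params
-- ===== SOURCE A (Python) =====
-- def approximate_kan_params(
--     input_dim: int,
--     hidden_width: int,
--     num_layers: int,
--     num_knots: int
-- ) -> int:
--     """
--     Compute the parameter count for a KAN with given configuration.
--
--     For each KANLayer with d_in -> d_out:
--       - Splines: d_in * d_out * num_knots parameters (coeffs)
--       - Biases: d_out
--     Total per layer: d_in * d_out * num_knots + d_out
--     """
--     total = 0
--     d_in = input_dim
--
--     for i in range(num_layers):
--         if i == num_layers - 1: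
--             d_out = 1
--         else:
--             d_out = hidden_width
--
--         # Spline coeffs + bias
--         total += d_in * d_out * num_knots + d_out
--         d_in = d_out
--
--     return total
-- ===== SOURCE B (Python) =====
-- def approximate_kan_params(
--     input_dim: int,
--     hidden_width: int,
--     num_layers: int,
--     num_knots: int
-- ) -> int:
--     # Closed-form: first layer + (num_layers-2) identical middle layers + last layer.
--     if num_layers <= 0:
--         return 0
--     if num_layers == 1:
--         return input_dim * num_knots + 1
--     first = input_dim * hidden_width * num_knots + hidden_width
--     middle = (num_layers - 2) * (hidden_width * hidden_width * num_knots + hidden_width)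
--     last = hidden_width * num_knots + 1
--     return first + middle + last
-- ===== Notes on version B (the rewrite author's own statement) =====
-- stated objective: faster
-- what changed: Replaced the per-layer accumulation loop by a closed-form arithmetic formula summing the first layer, the (num_layers-2) identical middle layers, and the last layer.
import Mathlib
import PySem

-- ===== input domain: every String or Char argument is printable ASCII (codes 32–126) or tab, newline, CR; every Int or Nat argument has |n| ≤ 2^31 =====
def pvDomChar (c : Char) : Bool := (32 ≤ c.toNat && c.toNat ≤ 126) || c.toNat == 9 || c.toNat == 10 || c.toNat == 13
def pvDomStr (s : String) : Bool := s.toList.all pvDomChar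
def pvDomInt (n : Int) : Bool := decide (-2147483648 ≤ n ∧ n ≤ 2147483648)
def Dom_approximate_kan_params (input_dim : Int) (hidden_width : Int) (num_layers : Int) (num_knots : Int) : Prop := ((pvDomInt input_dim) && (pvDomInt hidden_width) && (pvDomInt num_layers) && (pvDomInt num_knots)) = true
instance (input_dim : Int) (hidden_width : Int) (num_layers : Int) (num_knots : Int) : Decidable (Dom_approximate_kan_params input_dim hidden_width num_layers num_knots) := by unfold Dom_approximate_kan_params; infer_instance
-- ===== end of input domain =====

-- B replaces the per-layer loop by a closed-form first/middle/last-layer formula (O(1) vs O(num_layers)).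


-- ===== PORT A =====
-- loop body of A: d_out selection, accumulation, and carrying d_in (literal transliteration)
def kanStep (hidden_width num_layers num_knots : Int) (st : Int × Int) (i : Int) : Int × Int :=
  let d_out : Int := if i = num_layers - 1 then 1 else hidden_width
  (st.1 + st.2 * d_out * num_knots + d_out, d_out)

def approximate_kan_params (input_dim : Int) (hidden_width : Int) (num_layers : Int) (num_knots : Int) : Int :=
  ((PySem.List.pyRange 0 num_layers 1).foldl (kanStep hidden_width num_layers num_knots) (0, input_dim)).1

-- ===== PORT B =====
def approximate_kan_params_alt (input_dim : Int) (hidden_width : Int) (num_layers : Int) (num_knots : Int) : Int :=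
  if num_layers ≤ 0 then 0
  else if num_layers = 1 then input_dim * num_knots + 1
  else
    let first := input_dim * hidden_width * num_knots + hidden_width
    let middle := (num_layers - 2) * (hidden_width * hidden_width * num_knots + hidden_width)
    let last := hidden_width * num_knots + 1
    first + middle + last

-- ===== PRECONDITION & SPEC =====
def Spec_approximate_kan_params (input_dim : Int) (hidden_width : Int) (num_layers : Int) (num_knots : Int) (out : Int) : Prop := out = approximate_kan_params_alt input_dim hidden_width num_layers num_knots
instance (input_dim : Int) (hidden_width : Int) (num_layers : Int) (num_knots : Int) (out : Int) : Decidable (Spec_approximate_kan_params input_dim hidden_width num_layers num_knots out) := by unfold Spec_approximate_kan_params; infer_instance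

-- ===== CLAIM (what is proved, stated in full; the proofs are below) =====
def Claim_equal_approximate_kan_params : Prop := ∀ (input_dim : Int) (hidden_width : Int) (num_layers : Int) (num_knots : Int), Dom_approximate_kan_params input_dim hidden_width num_layers num_knots → Spec_approximate_kan_params input_dim hidden_width num_layers num_knots (approximate_kan_params input_dim hidden_width num_layers num_knots)

-- ===== LEMMAS AND PROOFS =====
-- After the first layer d_in stays hidden_width; m remaining iterations starting at a = num_layers - m.
theorem kan_tail (h nl k : Int) : ∀ (m : Nat) (a t : Int), a + m = nl → 1 ≤ m →
    (PySem.List.pyRange a nl 1).foldl (kanStep h nl k) (t, h)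
      = (t + (m - 1 : Int) * (h * h * k + h) + (h * k + 1), 1) := by
  intro m
  induction m with
  | zero => intro a t _ hm; omega
  | succ m ih =>
    intro a t ha _
    have hlt : a < nl := by push_cast at ha; omega
    rw [PySem.List.pyRange_one_cons hlt]
    by_cases hm : m = 0
    · subst hm
      have he : a = nl - 1 := by push_cast at ha; omega
      rw [PySem.List.pyRange_one_eq_nil (by omega : nl ≤ a + 1)]
      simp only [List.foldl, kanStep, if_pos he, Prod.mk.injEq]
      exact ⟨by push_cast; ring, trivial⟩
    · have hne : a ≠ nl - 1 := by push_cast at ha; omega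
      simp only [List.foldl, kanStep, if_neg hne]
      rw [ih (a + 1) (t + h * h * k + h) (by push_cast at ha ⊢; omega) (by omega)]
      simp only [Prod.mk.injEq]
      exact ⟨by push_cast; ring, trivial⟩

-- ===== VERDICT (by name: the statement is the Claim_ definition above) =====
theorem approximate_kan_params_spec : Claim_equal_approximate_kan_params := by
  intro input_dim h nl k _
  unfold Spec_approximate_kan_params approximate_kan_params approximate_kan_params_alt
  by_cases h0 : nl ≤ 0
  · rw [PySem.List.pyRange_one_eq_nil (by omega), if_pos h0]; rfl
  · by_cases h1 : nl = 1
    · subst h1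
      rw [PySem.List.pyRange_one_cons (by norm_num : (0:Int) < 1),
          PySem.List.pyRange_one_eq_nil (by norm_num : (1:Int) ≤ 0 + 1)]
      simp only [List.foldl, kanStep]
      norm_num
    · rw [PySem.List.pyRange_one_cons (by omega)]
      have hne : (0 : Int) ≠ nl - 1 := by omega
      simp only [List.foldl, kanStep, if_neg hne]
      have : (0 : Int) + 1 + ((nl - 1).toNat : Int) = nl := by omega
      rw [kan_tail h nl k (nl - 1).toNat (0 + 1) _ this (by omega)]
      rw [if_neg h0, if_neg h1]
      have : ((nl - 1).toNat : Int) = nl - 1 := by omega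
      rw [this]
      ring
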